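-- pv_equiv track=rewrite | github.com/berrypiez/exjobb | TP_MKII/trim_office_json.py | trim_trailing
-- ===== SOURCE A (Python) =====
-- def trim_trailing(data):
--     trimmed = {}
--
--     for video_name, video_data in data.items():
--         frames = video_data.get("frames", [])
--         last_valid_index = None
--         for i in range(len(frames) -1, -1, -1):
--             bbox = frames[i].get("bbox", None)
--             if bbox is not None:
--                 last_valid_index = i
--                 break
--
--         if last_valid_index is None:
--             trimmed_frames = []
--         else:
--             trimmed_frames = frames[:last_valid_index + 1]
--
--         trimmed[video_name] = {
--             **video_data,
--             "frames": trimmed_frames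
--         }
--     return trimmed
-- ===== SOURCE B (Python) =====
-- def _trim(frames):
--     frames = list(frames)
--     while frames and frames[-1].get("bbox", None) is None:
--         frames.pop()
--     return frames
--
--
-- def trim_trailing(data):
--     trimmed = {}
--     for video_name, video_data in data.items():
--         trimmed[video_name] = {
--             **video_data,
--             "frames": _trim(video_data.get("frames", []))
--         }
--     return trimmed
-- ===== Notes on version B (the rewrite author's own statement) =====
-- stated objective: alternative
-- what changed: A finds the last frame with a bbox by scanning indices backwards with a break and then slices frames[:i+1]; B instead pops trailing bbox-less frames off the end of a copied list in a while-loop, never computing an index or a slice.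
import Mathlib
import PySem

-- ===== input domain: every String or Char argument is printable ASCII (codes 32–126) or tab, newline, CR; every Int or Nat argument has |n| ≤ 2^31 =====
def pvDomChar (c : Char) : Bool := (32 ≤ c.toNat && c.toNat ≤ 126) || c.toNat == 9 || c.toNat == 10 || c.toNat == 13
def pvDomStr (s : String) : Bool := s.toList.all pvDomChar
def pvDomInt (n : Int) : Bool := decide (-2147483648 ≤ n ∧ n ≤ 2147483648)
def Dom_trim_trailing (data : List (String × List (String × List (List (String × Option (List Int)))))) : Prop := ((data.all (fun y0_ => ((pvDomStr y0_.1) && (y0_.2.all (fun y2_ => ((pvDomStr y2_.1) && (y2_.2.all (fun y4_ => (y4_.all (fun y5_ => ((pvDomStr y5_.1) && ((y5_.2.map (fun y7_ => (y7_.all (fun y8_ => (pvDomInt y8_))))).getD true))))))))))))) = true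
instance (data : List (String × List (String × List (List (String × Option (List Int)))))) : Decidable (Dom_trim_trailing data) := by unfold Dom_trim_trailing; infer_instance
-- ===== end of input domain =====

-- B replaces A's reverse index scan + slice by popping trailing bbox-less frames off the end (alternative decomposition, same cost).

-- ===== PORT A =====
-- frames[i].get("bbox", None); the none fallback for pyGet? is unreachable (i always in range here)
def pvBboxAtA (frames : List (List (String × Option (List Int)))) (i : Int) : Option (List Int) :=
  match PySem.List.pyGet? frames i with
  | some f => PySem.Dict.getD (PySem.Dict.mk f) "bbox" none
  | none => none

-- the reverse for-loop with break: first i in the countdown range whose frame has a bbox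
def pvLoopA (frames : List (List (String × Option (List Int)))) : List Int → Option Int
  | [] => none
  | i :: rest => if (pvBboxAtA frames i).isSome then some i else pvLoopA frames rest

def trim_trailing (data : List (String × List (String × List (List (String × Option (List Int)))))) : List (String × List (String × List (List (String × Option (List Int))))) :=
  (data.foldl (fun trimmed kv =>
      let frames := PySem.Dict.getD (PySem.Dict.mk kv.2) "frames" []
      let last_valid_index := pvLoopA frames (PySem.List.pyRange ((frames.length : Int) - 1) (-1) (-1))
      let trimmed_frames := match last_valid_index with
        | none => []
        | some i => PySem.List.slice frames none (some (i + 1))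
      trimmed.insert kv.1 ((PySem.Dict.mk kv.2).insert "frames" trimmed_frames).items)
    PySem.Dict.empty).items

-- ===== PORT B =====
-- while frames and frames[-1].get("bbox", None) is None: frames.pop()
def pvPopB (fs : List (List (String × Option (List Int)))) : List (List (String × Option (List Int))) :=
  match h : fs.getLast? with
  | some f =>
      if (PySem.Dict.getD (PySem.Dict.mk f) "bbox" none).isNone then pvPopB fs.dropLast else fs
  | none => fs
termination_by fs.length
decreasing_by
  have : fs ≠ [] := by intro hnil; simp [hnil] at h
  simpa [List.length_dropLast] using Nat.sub_lt (List.length_pos_iff.mpr this) one_pos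

def trim_trailing_alt (data : List (String × List (String × List (List (String × Option (List Int)))))) : List (String × List (String × List (List (String × Option (List Int))))) :=
  (data.foldl (fun trimmed kv =>
      trimmed.insert kv.1
        ((PySem.Dict.mk kv.2).insert "frames"
          (pvPopB (PySem.Dict.getD (PySem.Dict.mk kv.2) "frames" []))).items)
    PySem.Dict.empty).items

-- ===== PRECONDITION & SPEC =====
-- explicit DecidableEq helpers (instance synthesis gives up at this nesting depth)
def pvDE5 : DecidableEq (List (List (String × Option (List Int)))) := inferInstance
def pvDE4 : DecidableEq (String × List (List (String × Option (List Int)))) := fun a b => @instDecidableEqProd _ _ instDecidableEqString pvDE5 a b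
def pvDE3 : DecidableEq (List (String × List (List (String × Option (List Int))))) := fun a b => @List.hasDecEq _ pvDE4 a b
def pvDE2 : DecidableEq (String × List (String × List (List (String × Option (List Int))))) := fun a b => @instDecidableEqProd _ _ instDecidableEqString pvDE3 a b
def pvDE1 : DecidableEq (List (String × List (String × List (List (String × Option (List Int)))))) := fun a b => @List.hasDecEq _ pvDE2 a b

def Spec_trim_trailing (data : List (String × List (String × List (List (String × Option (List Int)))))) (out : List (String × List (String × List (List (String × Option (List Int)))))) : Prop := out = trim_trailing_alt data
instance (data : List (String × List (String × List (List (String × Option (List Int)))))) (out : List (String × List (String × List (List (String × Option (List Int)))))) : Decidable (Spec_trim_trailing data out) := by unfold Spec_trim_trailing; exact pvDE1 out (trim_trailing_alt data)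

-- ===== CLAIM (what is proved, stated in full; the proofs are below) =====
def Claim_equal_trim_trailing : Prop := ∀ (data : List (String × List (String × List (List (String × Option (List Int)))))), Dom_trim_trailing data → Spec_trim_trailing data (trim_trailing data)

-- ===== LEMMAS AND PROOFS =====

theorem pvLoopA_mem {frames : List (List (String × Option (List Int)))} {r : List Int} {i : Int}
    (h : pvLoopA frames r = some i) : i ∈ r := by
  induction r with
  | nil => simp [pvLoopA] at h
  | cons a rest ih =>
    by_cases hb : (pvBboxAtA frames a).isSome
    · simp [pvLoopA, hb] at h; simp [h]
    · simp [pvLoopA, hb] at h; exact List.mem_cons_of_mem _ (ih h)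

theorem pvLoopA_congr {f g : List (List (String × Option (List Int)))} {r : List Int}
    (h : ∀ i ∈ r, pvBboxAtA f i = pvBboxAtA g i) : pvLoopA f r = pvLoopA g r := by
  induction r with
  | nil => rfl
  | cons a rest ih =>
    have ha := h a (List.mem_cons_self)
    simp only [pvLoopA, ha]
    split <;> [rfl; exact ih (fun i hi => h i (List.mem_cons_of_mem _ hi))]

theorem pvBboxAtA_append {ys : List (List (String × Option (List Int)))}
    {y : List (String × Option (List Int))} {i : Int} (h0 : 0 ≤ i) (hl : i < ys.length) :
    pvBboxAtA (ys ++ [y]) i = pvBboxAtA ys i := by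
  obtain ⟨k, rfl⟩ := Int.eq_ofNat_of_zero_le h0
  have hk : k < ys.length := by exact_mod_cast hl
  simp [pvBboxAtA, PySem.List.pyGet?_natCast, List.getElem?_append_left hk]

theorem pvBboxAtA_last {ys : List (List (String × Option (List Int)))}
    {y : List (String × Option (List Int))} :
    pvBboxAtA (ys ++ [y]) (ys.length : Int) = PySem.Dict.getD (PySem.Dict.mk y) "bbox" none := by
  simp [pvBboxAtA]

-- the per-video core: A's scan-and-slice equals B's pop-while
theorem pvCore_eq (frames : List (List (String × Option (List Int)))) :
    (match pvLoopA frames (PySem.List.pyRange ((frames.length : Int) - 1) (-1) (-1)) with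
      | none => []
      | some i => PySem.List.slice frames none (some (i + 1))) = pvPopB frames := by
  induction frames using List.reverseRecOn with
  | nil =>
    rw [PySem.List.pyRange_neg_one_eq_nil (by norm_num)]
    simp [pvLoopA, pvPopB]
  | append_singleton ys y ih =>
    have hlen : ((ys ++ [y]).length : Int) - 1 = (ys.length : Int) := by
      simp
    rw [hlen, PySem.List.pyRange_neg_one_cons (by omega), pvPopB, List.getLast?_concat]
    by_cases hb : (PySem.Dict.getD (PySem.Dict.mk y) "bbox" none).isSome
    · obtain ⟨v, hv⟩ := Option.isSome_iff_exists.mp hb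
      simp only [pvLoopA, pvBboxAtA_last, hv, Option.isSome_some, if_true, Option.isNone_some,
        Bool.false_eq_true, if_false]
      have h1 : ((ys.length : Int) + 1) = ((ys.length + 1 : Nat) : Int) := by push_cast; ring
      rw [h1, PySem.List.slice_to_natCast]
      simp
    · have hv : PySem.Dict.getD (PySem.Dict.mk y) "bbox" none = none :=
        Option.not_isSome_iff_eq_none.mp hb
      simp only [pvLoopA, pvBboxAtA_last, hv, Option.isSome_none, Bool.false_eq_true, if_false,
        Option.isNone_none, if_true, List.dropLast_concat]
      have hcg : pvLoopA (ys ++ [y]) (PySem.List.pyRange ((ys.length : Int) - 1) (-1) (-1)) =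
          pvLoopA ys (PySem.List.pyRange ((ys.length : Int) - 1) (-1) (-1)) := by
        apply pvLoopA_congr
        intro i hi
        rw [PySem.List.mem_pyRange_neg_one] at hi
        exact pvBboxAtA_append (by omega) (by omega)
      rw [hcg, ← ih]
      cases hres : pvLoopA ys (PySem.List.pyRange ((ys.length : Int) - 1) (-1) (-1)) with
      | none => rfl
      | some i =>
        have hi := pvLoopA_mem hres
        rw [PySem.List.mem_pyRange_neg_one] at hi
        obtain ⟨k, rfl⟩ := Int.eq_ofNat_of_zero_le (by omega : (0:Int) ≤ i)
        have h1 : ((k : Int) + 1) = ((k + 1 : Nat) : Int) := by push_cast; ring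
        simp only [h1, PySem.List.slice_to_natCast]
        rw [List.take_append_of_le_length (by omega)]

theorem pvFoldlCongr {α β : Type} (f g : α → β → α) (h : ∀ a b, f a b = g a b) :
    ∀ (l : List β) (init : α), l.foldl f init = l.foldl g init := by
  intro l
  induction l with
  | nil => intro init; rfl
  | cons x xs ih => intro init; simp only [List.foldl_cons, h]; exact ih _

-- the two per-entry fold steps agree
theorem pvStep_eq (trimmed : PySem.Dict String (List (String × List (List (String × Option (List Int))))))
    (kv : String × List (String × List (List (String × Option (List Int))))) :
    (let frames := PySem.Dict.getD (PySem.Dict.mk kv.2) "frames" []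
     let last_valid_index := pvLoopA frames (PySem.List.pyRange ((frames.length : Int) - 1) (-1) (-1))
     let trimmed_frames := match last_valid_index with
       | none => []
       | some i => PySem.List.slice frames none (some (i + 1))
     trimmed.insert kv.1 ((PySem.Dict.mk kv.2).insert "frames" trimmed_frames).items) =
    trimmed.insert kv.1
      ((PySem.Dict.mk kv.2).insert "frames"
        (pvPopB (PySem.Dict.getD (PySem.Dict.mk kv.2) "frames" []))).items := by
  simp only [pvCore_eq]

-- ===== VERDICT (by name: the statement is the Claim_ definition above) =====
theorem trim_trailing_spec : Claim_equal_trim_trailing := by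
  intro data _
  unfold Spec_trim_trailing trim_trailing trim_trailing_alt
  congr 1
  rw [pvFoldlCongr _ _ (fun a b => pvStep_eq a b)]
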